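-- pv_equiv track=rewrite | github.com/Est17256/LAB2-Redes-Deteccion-Errores | lab2.py | PosRdn
-- ===== SOURCE A (Python) =====
-- def PosRdn(data, r):
--     j = 0
--     k = 1
--     m = len(data)
--     res = ''
--     for i in range(1, m + r+1):
--         if(i == 2**j):
--             res = res + '0'
--             j += 1
--         else:
--             res = res + data[-1 * k]
--             k += 1
--     return res[::-1]
-- ===== SOURCE B (Python) =====
-- def PosRdn(data, r):
--     n = len(data) + r
--     slots = [None] * max(n, 0)
--     p = 1
--     while p <= n:
--         slots[p - 1] = '0'
--         p *= 2
--     k = 1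
--     for idx in range(len(slots)):
--         if slots[idx] is None:
--             slots[idx] = data[-k]
--             k += 1
--     return ''.join(reversed(slots))
-- ===== Notes on version B (the rewrite author's own statement) =====
-- stated objective: alternative
-- what changed: A interleaves parity placeholders and data bits in one fused pass driven by two cursors (next power 2**j, data cursor k); B first builds a slot list and marks the power-of-two positions by a doubling loop, then fills the remaining slots from the end of data in a second pass.
import Mathlib
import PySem

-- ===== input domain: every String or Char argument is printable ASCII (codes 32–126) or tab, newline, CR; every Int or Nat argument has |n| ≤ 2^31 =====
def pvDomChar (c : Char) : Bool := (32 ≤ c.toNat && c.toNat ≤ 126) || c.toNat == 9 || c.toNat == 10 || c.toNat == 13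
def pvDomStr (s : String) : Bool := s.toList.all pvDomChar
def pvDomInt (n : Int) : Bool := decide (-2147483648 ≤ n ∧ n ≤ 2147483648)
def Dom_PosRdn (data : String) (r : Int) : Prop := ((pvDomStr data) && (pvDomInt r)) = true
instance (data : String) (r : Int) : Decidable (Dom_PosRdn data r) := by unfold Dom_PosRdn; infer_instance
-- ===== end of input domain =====

-- B replaces A's fused single pass (power-cursor j, data-cursor k) by two separate passes:
-- mark parity positions by doubling p, then fill remaining slots from the end of data (alternative decomposition, same cost).

-- ===== PORT A =====
-- fold over range(1, m+r+1) carrying (j, k, res); none = IndexError from data[-k]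
def PosRdnGo (data : List Char) : List Int → Nat → Nat → List Char → Option (List Char)
  | [], _, _, res => some res
  | i :: rest, j, k, res =>
    if i = (2 : Int) ^ j then
      PosRdnGo data rest (j + 1) k (res ++ ['0'])
    else
      match PySem.List.pyGet? data (-(k : Int)) with
      | some c => PosRdnGo data rest j (k + 1) (res ++ [c])
      | none => none

def PosRdn (data : String) (r : Int) : String :=
  -- m = len(data); inlined below
  match PosRdnGo data.toList (PySem.List.pyRange 1 (PySem.Str.len data + r + 1) 1) 0 1 [] with
  | some res => String.ofList res.reverse      -- res[::-1]
  | none => ""                             -- IndexError: excluded by Pre_PosRdn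

-- ===== PORT B =====
-- first pass of Source B: while p <= n: slots[p-1] = '0'; p *= 2   (1 ≤ p is a totality guard only; p starts at 1)
def markPows (n : Int) (p : Int) (slots : List (Option Char)) : List (Option Char) :=
  if h : 1 ≤ p ∧ p ≤ n then
    markPows n (p * 2) (slots.set (p - 1).toNat (some '0'))
  else slots
termination_by (n + 1 - p).toNat
decreasing_by omega

-- second pass of Source B: fill the unmarked slots with data[-k], k = 1, 2, …; none = IndexError
def fillSlots (data : List Char) : Nat → List (Option Char) → Option (List Char)
  | _, [] => some []
  | k, none :: rest =>
    match PySem.List.pyGet? data (-(k : Int)) with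
    | some c => (fillSlots data (k + 1) rest).map (c :: ·)
    | none => none
  | k, some c :: rest => (fillSlots data k rest).map (c :: ·)

def PosRdn_alt (data : String) (r : Int) : String :=
  -- n = len(data) + r; inlined below
  match fillSlots data.toList 1
      (markPows (PySem.Str.len data + r) 1 (List.replicate (PySem.Str.len data + r).toNat none)) with
  | some slots => String.ofList slots.reverse  -- ''.join(reversed(slots))
  | none => ""                             -- IndexError: excluded by Pre_PosRdn

-- ===== PRECONDITION & SPEC =====
-- Pre_ excludes exactly the inputs on which Python A raises IndexError: more non-power-of-two
-- positions in 1..len(data)+r than there are data bits (data[-k] runs off the front of data).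
-- (count of non-powers in 1..n, in closed form: n minus the log2 n + 1 powers of two ≤ n)
def Pre_PosRdn (data : String) (r : Int) : Prop :=
  (PySem.Str.len data + r).toNat - (Nat.log2 (PySem.Str.len data + r).toNat + 1) ≤ data.toList.length
instance (data : String) (r : Int) : Decidable (Pre_PosRdn data r) := by unfold Pre_PosRdn; infer_instance

def pvWitness_PosRdn : String × Int := ("1011", 3)

def Spec_PosRdn (data : String) (r : Int) (out : String) : Prop := out = PosRdn_alt data r
instance (data : String) (r : Int) (out : String) : Decidable (Spec_PosRdn data r out) := by unfold Spec_PosRdn; infer_instance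

-- ===== CLAIM (what is proved, stated in full; the proofs are below) =====
def Claim_equal_PosRdn : Prop := ∀ (data : String) (r : Int), Dom_PosRdn data r → Pre_PosRdn data r → Spec_PosRdn data r (PosRdn data r)

-- ===== LEMMAS AND PROOFS =====

def isPow2 (x : Nat) : Bool := (List.range (x + 1)).any (fun t => x == 2 ^ t)

-- common spec of the character sequence both programs build (before reversal): position i gets
-- '0' if i is a power of two, else the next data bit from the end (cursor k)
def specGo (data : List Char) : Nat → Nat → Nat → Option (List Char)
  | 0, _, _ => some []
  | len + 1, i, k =>
    if isPow2 i then (specGo data len (i + 1) k).map ('0' :: ·)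
    else
      match PySem.List.pyGet? data (-(k : Int)) with
      | some c => (specGo data len (i + 1) (k + 1)).map (c :: ·)
      | none => none

-- the slot pattern after B's mark pass, as a structural list
def patL : Nat → Nat → List (Option Char)
  | 0, _ => []
  | len + 1, i => (if isPow2 i then some '0' else none) :: patL len (i + 1)

theorem isPow2_iff (x : Nat) : isPow2 x = true ↔ ∃ t, x = 2 ^ t := by
  simp only [isPow2, List.any_eq_true, List.mem_range, beq_iff_eq]
  constructor
  · rintro ⟨t, _, h⟩; exact ⟨t, h⟩
  · rintro ⟨t, rfl⟩; exact ⟨t, Nat.lt_succ_of_lt (Nat.lt_two_pow_self), rfl⟩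

theorem pow_eq_iff (a : Int) (j : Nat) (h1 : 1 ≤ a) (h2 : a ≤ 2 ^ j) (h3 : (2 : Int) ^ j < 2 * a) :
    (a = (2 : Int) ^ j) ↔ isPow2 a.toNat = true := by
  constructor
  · rintro rfl
    exact (isPow2_iff _).2 ⟨j, by
      rw [show ((2:Int)) ^ j = ((2 ^ j : Nat) : Int) by push_cast; ring, Int.toNat_natCast]⟩
  · intro h
    obtain ⟨t, ht⟩ := (isPow2_iff _).1 h
    have ha : a = ((2 : Int)) ^ t := by
      have := Int.toNat_of_nonneg (by omega : (0:Int) ≤ a)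
      rw [← this, ht]; push_cast; ring
    subst ha
    have htj : t = j := by
      have h2' : (2:Int) ^ t ≤ 2 ^ j := h2
      have h3' : (2:Int) ^ j < 2 ^ (t + 1) := by rw [pow_succ]; linarith
      have p1 : t ≤ j := by
        by_contra hc
        have : (2:Int) ^ j < 2 ^ t := by
          apply pow_lt_pow_right₀ (by norm_num) (by omega)
        linarith
      have p2 : j < t + 1 := by
        by_contra hc
        have : (2:Int) ^ (t+1) ≤ 2 ^ j := by
          apply pow_le_pow_right₀ (by norm_num) (by omega)
        linarith
      omega
    rw [htj]

-- A's loop equals specGo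
theorem goA_spec (data : List Char) :
    ∀ (len : Nat) (a : Int) (j k : Nat) (res : List Char),
      1 ≤ a → a ≤ 2 ^ j → (2 : Int) ^ j < 2 * a →
      PosRdnGo data (PySem.List.pyRange a (a + len) 1) j k res
        = (specGo data len a.toNat k).map (res ++ ·) := by
  intro len
  induction len with
  | zero =>
    intro a j k res _ _ _
    rw [show a + (0:Nat) = a by push_cast; ring,
        PySem.List.pyRange_one_eq_nil (le_refl a)]
    simp [PosRdnGo, specGo]
  | succ len ih =>
    intro a j k res h1 h2 h3
    rw [PySem.List.pyRange_one_cons (by push_cast; omega : a < a + ((len + 1 : Nat) : Int)),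
        show a + ((len + 1 : Nat) : Int) = (a + 1) + (len : Nat) by push_cast; ring]
    have hat : (a + 1).toNat = a.toNat + 1 := by omega
    by_cases hpow : a = (2 : Int) ^ j
    · have hp2 : isPow2 a.toNat = true := (pow_eq_iff a j h1 h2 h3).1 hpow
      simp only [PosRdnGo, if_pos hpow]
      rw [ih (a + 1) (j + 1) k (res ++ ['0']) (by omega)
            (by rw [pow_succ]; omega) (by rw [pow_succ]; omega)]
      simp only [specGo, hp2, if_pos, hat]
      cases specGo data len (a.toNat + 1) k <;> simp
    · have hp2 : isPow2 a.toNat = false := by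
        rw [← Bool.not_eq_true]; exact fun hc => hpow ((pow_eq_iff a j h1 h2 h3).2 hc)
      simp only [PosRdnGo, if_neg hpow]
      have hlt : a < 2 ^ j := lt_of_le_of_ne h2 hpow
      cases hg : PySem.List.pyGet? data (-(k : Int)) with
      | none => simp [specGo, hp2, hg]
      | some c =>
        dsimp only
        rw [ih (a + 1) j (k + 1) (res ++ [c]) (by omega) (by omega) (by omega)]
        simp only [specGo, hp2, Bool.false_eq_true, hg, hat]
        cases specGo data len (a.toNat + 1) (k + 1) <;> simp

-- B's fill pass on the marked pattern equals specGo
theorem fill_pat (data : List Char) :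
    ∀ (len i k : Nat), fillSlots data k (patL len i) = specGo data len i k := by
  intro len
  induction len with
  | zero => intro i k; simp [patL, specGo, fillSlots]
  | succ len ih =>
    intro i k
    by_cases hp : isPow2 i
    · simp [patL, hp, fillSlots, specGo, ih]
    · simp only [patL, hp, Bool.false_eq_true]
      cases hg : PySem.List.pyGet? data (-(k : Int)) <;>
        simp [fillSlots, specGo, hg, hp, ih]

theorem patL_length : ∀ len i, (patL len i).length = len := by
  intro len
  induction len with
  | zero => intro i; rfl
  | succ len ih => intro i; simp [patL, ih]

theorem patL_get : ∀ len i idx, idx < len →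
    (patL len i)[idx]? = some (if isPow2 (i + idx) then some '0' else none) := by
  intro len
  induction len with
  | zero => omega
  | succ len ih =>
    intro i idx hidx
    cases idx with
    | zero => simp [patL]
    | succ idx =>
      have h := ih (i + 1) idx (by omega)
      rw [show i + (idx + 1) = i + 1 + idx by omega]
      simpa [patL] using h

theorem mark_length (n : Int) : ∀ (f : Nat) (p : Int) (s : List (Option Char)),
    (n + 1 - p).toNat ≤ f → (markPows n p s).length = s.length := by
  intro f
  induction f with
  | zero =>
    intro p s hf
    rw [markPows, dif_neg (by omega)]
  | succ f ih =>
    intro p s hf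
    rw [markPows]
    by_cases h : 1 ≤ p ∧ p ≤ n
    · rw [dif_pos h, ih (p * 2) _ (by omega)]; simp
    · rw [dif_neg h]

theorem mark_get (n : Int) : ∀ (f t : Nat) (s : List (Option Char)) (idx : Nat),
    n.toNat ≤ t + f → idx < s.length →
    (markPows n ((2 : Int) ^ t) s)[idx]?
      = if isPow2 (idx + 1) && decide ((2 : Int) ^ t ≤ (idx : Int) + 1) && decide ((idx : Int) + 1 ≤ n)
        then some (some '0') else s[idx]? := by
  intro f
  induction f with
  | zero =>
    intro t s idx hf hidx
    have hbig : n < (2 : Int) ^ t := by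
      have h1 : (t : Int) < 2 ^ t := by exact_mod_cast Nat.lt_two_pow_self
      omega
    rw [markPows, dif_neg (by omega)]
    rw [if_neg (by
      intro hc
      simp only [Bool.and_eq_true, decide_eq_true_eq] at hc
      omega)]
  | succ f ih =>
    intro t s idx hf hidx
    rw [markPows]
    by_cases h : (1:Int) ≤ 2 ^ t ∧ (2:Int) ^ t ≤ n
    · rw [dif_pos h]
      have hrec := ih (t + 1) (s.set ((2:Int) ^ t - 1).toNat (some '0')) idx
        (by
          have : (2:Int) ^ t ≤ n := h.2
          have h1 : (t : Int) < 2 ^ t := by exact_mod_cast Nat.lt_two_pow_self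
          omega)
        (by simpa using hidx)
      rw [show (2:Int) ^ t * 2 = 2 ^ (t + 1) from by rw [pow_succ], hrec]
      by_cases heq : (idx : Int) + 1 = (2:Int) ^ t
      · -- this is the position set in this step
        have hidxeq : ((2:Int) ^ t - 1).toNat = idx := by omega
        have hpw : isPow2 (idx + 1) = true := by
          apply (isPow2_iff _).2
          refine ⟨t, ?_⟩
          have h2t : ((idx : Int) + 1) = ((2 ^ t : Nat) : Int) := by push_cast; omega
          omega
        rw [if_neg (by
          intro hc
          simp only [Bool.and_eq_true, decide_eq_true_eq] at hc
          rw [pow_succ] at hc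
          omega)]
        rw [hidxeq, List.getElem?_set_self hidx,
          if_pos (by
            simp only [Bool.and_eq_true, decide_eq_true_eq]
            exact ⟨⟨hpw, by omega⟩, by omega⟩)]
      · have hset : (s.set ((2:Int) ^ t - 1).toNat (some '0'))[idx]? = s[idx]? := by
          rw [List.getElem?_set_ne]; omega
        rw [hset]
        congr 1
        -- the two conditions agree when idx+1 ≠ 2^t
        by_cases hpw : isPow2 (idx + 1)
        · obtain ⟨u, hu⟩ := (isPow2_iff _).1 hpw
          simp only [hpw, Bool.true_and]
          congr 1
          have hval : (idx : Int) + 1 = (2:Int) ^ u := by exact_mod_cast hu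
          by_cases hut : t ≤ u
          · have h1 : (2:Int) ^ t ≤ (idx : Int) + 1 := by
              rw [hval]; exact pow_le_pow_right₀ (by norm_num) hut
            have hut' : t + 1 ≤ u := by
              rcases Nat.lt_or_ge t u with hl | hg
              · omega
              · exfalso; apply heq; rw [hval]; congr 1; omega
            have h2 : (2:Int) ^ (t+1) ≤ (idx : Int) + 1 := by
              rw [hval]; exact pow_le_pow_right₀ (by norm_num) hut'
            simp [h1, h2]
          · have h1 : (idx : Int) + 1 < (2:Int) ^ t := by
              rw [hval]; exact pow_lt_pow_right₀ (by norm_num) (by omega)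
            have h2 : (idx : Int) + 1 < (2:Int) ^ (t+1) := by
              have hmono : (2:Int) ^ t ≤ 2 ^ (t+1) := pow_le_pow_right₀ (by norm_num) (by omega)
              omega
            simp [not_le.2 h1, not_le.2 h2]
        · simp [hpw]
    · rw [dif_neg h]
      rw [if_neg (by
        intro hc
        simp only [Bool.and_eq_true, decide_eq_true_eq] at hc
        have h1 : (1:Int) ≤ 2 ^ t := one_le_pow₀ (by norm_num)
        omega)]

-- the marked slot list IS the pattern
theorem mark_eq_pat (n : Int) :
    markPows n 1 (List.replicate n.toNat none) = patL n.toNat 1 := by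
  apply List.ext_getElem?
  intro idx
  have hlen : (markPows n 1 (List.replicate n.toNat (none : Option Char))).length = n.toNat :=
    by rw [mark_length n (n + 1 - 1).toNat 1 _ (le_refl _)]; simp
  by_cases hidx : idx < n.toNat
  · have h0 := mark_get n n.toNat 0 (List.replicate n.toNat (none : Option Char)) idx
      (by omega) (by simpa using hidx)
    rw [pow_zero] at h0
    rw [h0, patL_get n.toNat 1 idx hidx]
    have hc1 : ((2:Int) ^ 0 ≤ (idx : Int) + 1) := by simp
    have hc2 : ((idx : Int) + 1 ≤ n) := by omega
    simp only [pow_zero] at hc1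
    simp [hc1, hc2, hidx, Nat.add_comm 1 idx]
    by_cases hpw : isPow2 (idx + 1) <;> simp [hpw]
  · rw [List.getElem?_eq_none (by omega), List.getElem?_eq_none (by rw [patL_length]; omega)]

-- ===== VERDICT (by name: the statement is the Claim_ definition above) =====
theorem PosRdn_spec : Claim_equal_PosRdn := by
  intro data r _ _
  unfold Spec_PosRdn PosRdn PosRdn_alt
  have hrange : PySem.List.pyRange 1 (PySem.Str.len data + r + 1) 1
      = PySem.List.pyRange 1 (1 + ((PySem.Str.len data + r).toNat : Int)) 1 := by
    by_cases hn : 0 ≤ PySem.Str.len data + r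
    · congr 1; omega
    · rw [PySem.List.pyRange_one_eq_nil (by omega), PySem.List.pyRange_one_eq_nil (by omega)]
  rw [hrange, goA_spec data.toList (PySem.Str.len data + r).toNat 1 0 1 []
        (by omega) (by norm_num) (by norm_num),
      mark_eq_pat, fill_pat]
  simp only [Int.toNat_one]
  cases specGo data.toList (PySem.Str.len data + r).toNat 1 1 <;> simp
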